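-- pv_equiv track=rewrite | github.com/RascalTwo/DailyProblem | problems/DailyCoding/194/solve.py | solve
-- ===== SOURCE A (Python) =====
-- from typing import List, Tuple
--
-- Point = Tuple[int, int]
--
-- ABC = Tuple[int, int, int]
--
-- def points_to_abc(origin: Point, dest: Point) -> ABC:
-- 	a = dest[1] - origin[1]
-- 	b = origin[0] - dest[0]
-- 	return a, b, (a * origin[0]) + (b * origin[1])
--
-- def does_line_intersect(a: ABC, b: ABC) -> bool:
-- 	return not (a[0] * b[1]) - (a[1] * b[0])
--
-- def solve(a: List[Point], b: List[Point]) -> int: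
-- 	points: List[ABC] = []
-- 	for i in range(len(a)):
-- 		points.append(points_to_abc(a[i], b[i]))
--
-- 	intersections = 0
-- 	for i in range(len(points) - 1):
-- 		for j in range(i + 1, len(points)):
-- 			intersections += does_line_intersect(points[i], points[j])
--
-- 	return intersections
-- ===== SOURCE B (Python) =====
-- from math import gcd
-- from typing import List, Tuple
--
-- Point = Tuple[int, int]
--
-- def solve(a: List[Point], b: List[Point]) -> int:
-- 	total = zeros = seen = 0
-- 	counts = {}
-- 	for (ox, oy), (dx, dy) in zip(a, b):
-- 		va, vb = dy - oy, ox - dx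
-- 		if va == 0 and vb == 0:
-- 			total += seen
-- 			zeros += 1
-- 		else:
-- 			g = gcd(va, vb)
-- 			if va < 0 or (va == 0 and vb < 0):
-- 				g = -g
-- 			key = (va // g, vb // g)
-- 			total += zeros + counts.get(key, 0)
-- 			counts[key] = counts.get(key, 0) + 1
-- 		seen += 1
-- 	return total
-- ===== Notes on version B (the rewrite author's own statement) =====
-- stated objective: faster
-- what changed: Replaced the O(n^2) all-pairs cross-product test with a single pass that buckets each direction vector by its sign-fixed gcd-normalized form in a dict (zero vectors counted separately as parallel to everything) and sums matches as it goes.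
import Mathlib
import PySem

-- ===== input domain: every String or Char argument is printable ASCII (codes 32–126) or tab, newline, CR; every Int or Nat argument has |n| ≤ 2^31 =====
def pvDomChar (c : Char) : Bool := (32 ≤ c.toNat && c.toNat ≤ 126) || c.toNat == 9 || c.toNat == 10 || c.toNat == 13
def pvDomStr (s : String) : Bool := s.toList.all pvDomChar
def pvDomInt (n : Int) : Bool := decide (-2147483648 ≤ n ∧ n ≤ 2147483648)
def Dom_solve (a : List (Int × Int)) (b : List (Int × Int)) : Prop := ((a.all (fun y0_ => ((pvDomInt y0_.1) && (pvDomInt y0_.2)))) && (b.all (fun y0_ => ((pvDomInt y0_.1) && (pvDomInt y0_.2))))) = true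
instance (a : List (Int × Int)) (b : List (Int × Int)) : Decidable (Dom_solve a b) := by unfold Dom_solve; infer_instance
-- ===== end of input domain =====

-- B replaces A's all-pairs O(n^2) cross-product scan by one pass that buckets each
-- direction vector under its sign-fixed gcd-normalized form in a dict (zero vectors
-- counted separately, as they are parallel to everything): objective = faster.

-- ===== PORT A =====
def points_to_abc (origin : Int × Int) (dest : Int × Int) : Int × Int × Int :=
  let a := dest.2 - origin.2
  let b := origin.1 - dest.1
  (a, b, a * origin.1 + b * origin.2)

def does_line_intersect (a : Int × Int × Int) (b : Int × Int × Int) : Bool :=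
  -- Python: `not (a[0]*b[1] - a[1]*b[0])` — truthiness of an int, True iff it is 0
  decide (a.1 * b.2.1 - a.2.1 * b.1 = 0)

def solve (a : List (Int × Int)) (b : List (Int × Int)) : Int :=
  let points : List (Int × Int × Int) :=
    (PySem.List.pyRange 0 (PySem.List.len a) 1).foldl
      (fun pts i =>
        pts ++ [points_to_abc (PySem.List.pyGetD a i (0, 0)) (PySem.List.pyGetD b i (0, 0))]) []
  -- `intersections += <bool>` adds 1 for True, 0 for False
  (PySem.List.pyRange 0 (PySem.List.len points - 1) 1).foldl
    (fun acc i =>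
      (PySem.List.pyRange (i + 1) (PySem.List.len points) 1).foldl
        (fun acc j =>
          acc + (if does_line_intersect (PySem.List.pyGetD points i (0, 0, 0))
                      (PySem.List.pyGetD points j (0, 0, 0)) then 1 else 0)) acc) 0

-- ===== PORT B =====
-- key = (va // g, vb // g) with g = math.gcd(va, vb), sign-flipped as in Source B
def normKey (va : Int) (vb : Int) : Int × Int :=
  let g : Int := (Int.gcd va vb : Int)
  let g : Int := if va < 0 ∨ (va = 0 ∧ vb < 0) then -g else g
  (PySem.Int.floordiv va g, PySem.Int.floordiv vb g)

-- state = (total, zeros, seen, counts)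
def solveAltStep (st : Int × Int × Int × PySem.Dict (Int × Int) Int)
    (p : (Int × Int) × (Int × Int)) : Int × Int × Int × PySem.Dict (Int × Int) Int :=
  let va := p.2.2 - p.1.2
  let vb := p.1.1 - p.2.1
  if va = 0 ∧ vb = 0 then
    (st.1 + st.2.2.1, st.2.1 + 1, st.2.2.1 + 1, st.2.2.2)
  else
    let key := normKey va vb
    (st.1 + st.2.1 + st.2.2.2.getD key 0, st.2.1, st.2.2.1 + 1,
      st.2.2.2.insert key (st.2.2.2.getD key 0 + 1))

def solve_alt (a : List (Int × Int)) (b : List (Int × Int)) : Int :=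
  ((a.zip b).foldl solveAltStep (0, 0, 0, PySem.Dict.empty)).1

-- ===== PRECONDITION & SPEC =====
-- A indexes b[i] for every i < len(a): it raises IndexError iff len(b) < len(a).
def Pre_solve (a : List (Int × Int)) (b : List (Int × Int)) : Prop := a.length ≤ b.length
instance (a : List (Int × Int)) (b : List (Int × Int)) : Decidable (Pre_solve a b) := by
  unfold Pre_solve; infer_instance

def pvWitness_solve : (List (Int × Int)) × (List (Int × Int)) :=
  ([(0, 0), (1, 1), (2, 2)], [(1, 2), (3, 5), (0, 1)])

def Spec_solve (a : List (Int × Int)) (b : List (Int × Int)) (out : Int) : Prop := out = solve_alt a b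
instance (a : List (Int × Int)) (b : List (Int × Int)) (out : Int) : Decidable (Spec_solve a b out) := by
  unfold Spec_solve; infer_instance

-- ===== CLAIM (what is proved, stated in full; the proofs are below) =====
def Claim_equal_solve : Prop := ∀ (a : List (Int × Int)) (b : List (Int × Int)), Dom_solve a b → Pre_solve a b → Spec_solve a b (solve a b)

-- ===== LEMMAS AND PROOFS =====

-- direction vector of one (origin, dest) line
def dirOf (p : (Int × Int) × (Int × Int)) : Int × Int := (p.2.2 - p.1.2, p.1.1 - p.2.1)

-- Bool test "the two direction vectors are parallel" (cross product zero)
def parB (u v : Int × Int) : Bool := decide (u.1 * v.2 - u.2 * v.1 = 0)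

-- number of unordered pairs of parallel vectors
def pairCount : List (Int × Int) → Int
  | [] => 0
  | v :: rest => (rest.countP (fun u => parB v u) : Int) + pairCount rest

theorem parB_comm (u v : Int × Int) : parB u v = parB v u := by
  simp only [parB, decide_eq_decide]
  constructor <;> intro h <;> linarith

theorem pairCount_append_singleton (vs : List (Int × Int)) (v : Int × Int) :
    pairCount (vs ++ [v]) = pairCount vs + (vs.countP (fun u => parB u v) : Int) := by
  induction vs with
  | nil => simp [pairCount]
  | cons x xs ih =>
    simp only [List.cons_append, pairCount, List.countP_append, List.countP_cons,
      List.countP_nil, ih, parB_comm x v]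
    by_cases h : parB v x = true <;> simp [h] <;> ring

theorem parB_zero_right (u : Int × Int) : parB u (0, 0) = true := by simp [parB]

theorem parB_zero_left (v : Int × Int) : parB (0, 0) v = true := by simp [parB]

-- the signed gcd B divides by
def signedG (x y : Int) : Int :=
  if x < 0 ∨ (x = 0 ∧ y < 0) then -(Int.gcd x y : Int) else (Int.gcd x y : Int)

theorem normKey_eq (x y : Int) :
    normKey x y = (Int.fdiv x (signedG x y), Int.fdiv y (signedG x y)) := rfl

theorem gcd_pos' {x y : Int} (h : ¬(x = 0 ∧ y = 0)) : 0 < (Int.gcd x y : Int) := by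
  have : x ≠ 0 ∨ y ≠ 0 := by tauto
  exact_mod_cast Int.gcd_pos_iff.mpr this

theorem signedG_ne_zero {x y : Int} (h : ¬(x = 0 ∧ y = 0)) : signedG x y ≠ 0 := by
  have := gcd_pos' h
  unfold signedG; split <;> omega

theorem signedG_mul_normKey {x y : Int} (h : ¬(x = 0 ∧ y = 0)) :
    x = signedG x y * (normKey x y).1 ∧ y = signedG x y * (normKey x y).2 := by
  have hg := signedG_ne_zero h
  have hdx : signedG x y ∣ x := by
    unfold signedG; split
    · exact (neg_dvd).mpr (Int.gcd_dvd_left x y)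
    · exact Int.gcd_dvd_left x y
  have hdy : signedG x y ∣ y := by
    unfold signedG; split
    · exact (neg_dvd).mpr (Int.gcd_dvd_right x y)
    · exact Int.gcd_dvd_right x y
  rw [normKey_eq]
  exact ⟨(Int.mul_fdiv_cancel' hdx).symm, (Int.mul_fdiv_cancel' hdy).symm⟩

theorem signedG_mul {t x y : Int} (ht : t ≠ 0) (h : ¬(x = 0 ∧ y = 0)) :
    signedG (t * x) (t * y) = t * signedG x y := by
  have hgpos := gcd_pos' h
  unfold signedG
  have hgm : (Int.gcd (t * x) (t * y) : Int) = (t.natAbs : Int) * (Int.gcd x y : Int) := by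
    rw [Int.gcd_mul_left t x y]; push_cast; ring
  have hx0 : t * x = 0 ↔ x = 0 := by simp [mul_eq_zero, ht]
  rcases lt_or_gt_of_ne ht with hneg | hpos
  · have habs : (t.natAbs : Int) = -t := by omega
    have hxn : t * x < 0 ↔ 0 < x :=
      ⟨fun hh => by nlinarith, fun hh => mul_neg_of_neg_of_pos hneg hh⟩
    have hyn : t * y < 0 ↔ 0 < y :=
      ⟨fun hh => by nlinarith, fun hh => mul_neg_of_neg_of_pos hneg hh⟩
    rw [hgm, habs]
    split_ifs with c1 c2 c2
    · rw [hx0, hxn, hyn] at c1; exfalso; rcases c1 with c1 | c1 <;> rcases c2 with c2 | c2 <;> omega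
    · ring
    · ring
    · rw [hx0, hxn, hyn] at c1
      exfalso
      rcases (not_or).mp c1 with ⟨c1a, c1b⟩
      rcases (not_or).mp c2 with ⟨c2a, c2b⟩
      rcases (not_and_or).mp c1b with c1b | c1b <;> rcases (not_and_or).mp c2b with c2b | c2b <;>
        rcases (not_and_or).mp h with h' | h' <;> omega
  · have habs : (t.natAbs : Int) = t := by omega
    have hxn : t * x < 0 ↔ x < 0 :=
      ⟨fun hh => by nlinarith, fun hh => mul_neg_of_pos_of_neg hpos hh⟩
    have hyn : t * y < 0 ↔ y < 0 :=
      ⟨fun hh => by nlinarith, fun hh => mul_neg_of_pos_of_neg hpos hh⟩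
    rw [hgm, habs]
    split_ifs with c1 c2 c2
    · ring
    · rw [hx0, hxn, hyn] at c1; exfalso; rcases c1 with c1 | c1 <;> tauto
    · rw [hx0, hxn, hyn] at c1; exfalso; rcases c2 with c2 | c2 <;> tauto
    · ring

theorem normKey_mul {t x y : Int} (ht : t ≠ 0) (h : ¬(x = 0 ∧ y = 0)) :
    normKey (t * x) (t * y) = normKey x y := by
  obtain ⟨hx, hy⟩ := signedG_mul_normKey h
  have hG := signedG_ne_zero h
  have htG : t * signedG x y ≠ 0 := mul_ne_zero ht hG
  have e1 : t * x = (t * signedG x y) * (normKey x y).1 := by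
    conv_lhs => rw [hx]
    ring
  have e2 : t * y = (t * signedG x y) * (normKey x y).2 := by
    conv_lhs => rw [hy]
    ring
  rw [normKey_eq (t * x) (t * y), signedG_mul ht h, e1, e2,
    Int.mul_fdiv_cancel_left _ htG, Int.mul_fdiv_cancel_left _ htG, normKey_eq x y]

-- the crux: two nonzero vectors are parallel iff their normalized keys agree
theorem parB_iff_normKey {u v : Int × Int} (hu : ¬(u.1 = 0 ∧ u.2 = 0)) (hv : ¬(v.1 = 0 ∧ v.2 = 0)) :
    parB u v = true ↔ normKey u.1 u.2 = normKey v.1 v.2 := by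
  constructor
  · intro hc
    have heq : u.1 * v.2 = u.2 * v.1 := by
      have h' : u.1 * v.2 - u.2 * v.1 = 0 := of_decide_eq_true hc
      linarith
    by_cases hv1 : v.1 = 0
    · have hv2 : v.2 ≠ 0 := by tauto
      have hu2 : u.2 ≠ 0 := by
        intro h0
        have : u.1 * v.2 = 0 := by rw [heq, h0]; ring
        rcases mul_eq_zero.mp this with h1 | h1
        · exact hu ⟨h1, h0⟩
        · exact hv2 h1
      calc normKey u.1 u.2 = normKey (v.2 * u.1) (v.2 * u.2) := (normKey_mul hv2 hu).symm
        _ = normKey (u.2 * v.1) (u.2 * v.2) := by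
            rw [show v.2 * u.1 = u.2 * v.1 by linarith [heq], mul_comm v.2 u.2]
        _ = normKey v.1 v.2 := normKey_mul hu2 hv
    · have hu1 : u.1 ≠ 0 := by
        intro h0
        have : u.2 * v.1 = 0 := by rw [← heq, h0]; ring
        rcases mul_eq_zero.mp this with h1 | h1
        · exact hu ⟨h0, h1⟩
        · exact hv1 h1
      calc normKey u.1 u.2 = normKey (v.1 * u.1) (v.1 * u.2) := (normKey_mul hv1 hu).symm
        _ = normKey (u.1 * v.1) (u.1 * v.2) := by
            rw [mul_comm v.1 u.1, show v.1 * u.2 = u.1 * v.2 by linarith [heq]]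
        _ = normKey v.1 v.2 := normKey_mul hu1 hv
  · intro hk
    obtain ⟨hux, huy⟩ := signedG_mul_normKey hu
    obtain ⟨hvx, hvy⟩ := signedG_mul_normKey hv
    have hux' : u.1 = signedG u.1 u.2 * (normKey v.1 v.2).1 := by rw [← hk]; exact hux
    have huy' : u.2 = signedG u.1 u.2 * (normKey v.1 v.2).2 := by rw [← hk]; exact huy
    simp only [parB, decide_eq_true_eq]
    linear_combination v.2 * hux' - v.1 * huy' -
      (signedG u.1 u.2 * (normKey v.1 v.2).2) * hvx +
      (signedG u.1 u.2 * (normKey v.1 v.2).1) * hvy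

-- splitting "parallel to a fixed nonzero v" into "zero vector" and "same normalized key"
theorem countP_par_split (v : Int × Int) (hv : ¬(v.1 = 0 ∧ v.2 = 0)) (vs : List (Int × Int)) :
    vs.countP (fun u => parB u v) =
      vs.countP (fun u => u == (0, 0)) +
      vs.countP (fun u => !(u == (0, 0)) && (normKey u.1 u.2 == normKey v.1 v.2)) := by
  induction vs with
  | nil => simp
  | cons u us ih =>
    simp only [List.countP_cons, ih]
    by_cases hu : u = ((0 : Int), (0 : Int))
    · subst hu
      simp [parB_zero_left]
      omega
    · have h1 : (u == ((0 : Int), (0 : Int))) = false := by simp [hu]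
      have hu' : ¬(u.1 = 0 ∧ u.2 = 0) := by
        intro hh; exact hu (Prod.ext_iff.mpr hh)
      by_cases hkey : normKey u.1 u.2 = normKey v.1 v.2
      · have hp : parB u v = true := (parB_iff_normKey hu' hv).mpr hkey
        simp [h1, hp, hkey]
        omega
      · have hp : parB u v = false := by
          rw [← Bool.not_eq_true]
          exact fun hh => hkey ((parB_iff_normKey hu' hv).mp hh)
        simp [h1, hp, hkey]

-- ===== A-side: solve computes pairCount of the direction vectors =====

-- the two components of an ABC triple that does_line_intersect reads
def fst2 (t : Int × Int × Int) : Int × Int := (t.1, t.2.1)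

def indP (ps : List (Int × Int × Int)) (i j : Int) : Int :=
  if does_line_intersect (PySem.List.pyGetD ps i (0, 0, 0)) (PySem.List.pyGetD ps j (0, 0, 0))
  then 1 else 0

-- A's double loop as a sum of sums
def Aloop (ps : List (Int × Int × Int)) : Int :=
  ((PySem.List.pyRange 0 ((ps.length : Int) - 1) 1).map (fun i =>
    ((PySem.List.pyRange (i + 1) (ps.length : Int) 1).map (fun j => indP ps i j)).sum)).sum

theorem pyRange_shift (a b : Int) :
    PySem.List.pyRange (a + 1) (b + 1) 1 = (PySem.List.pyRange a b 1).map (· + 1) := by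
  rw [PySem.List.pyRange_one, PySem.List.pyRange_one, List.map_map]
  rw [show b + 1 - (a + 1) = b - a by ring]
  congr 1
  funext k
  simp only [Function.comp_apply]
  omega

theorem pyGetD_cons_succ' {α : Type} (x : α) (xs : List α) (i : Int) (hi : 0 ≤ i) (d : α) :
    PySem.List.pyGetD (x :: xs) (i + 1) d = PySem.List.pyGetD xs i d := by
  obtain ⟨k, rfl⟩ := Int.eq_ofNat_of_zero_le hi
  rw [show ((k : Int) + 1) = ((k + 1 : Nat) : Int) by push_cast; ring,
    PySem.List.pyGetD_natCast, PySem.List.pyGetD_natCast]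
  simp

theorem pyRange_shift1 (b : Int) :
    PySem.List.pyRange 1 (b + 1) 1 = (PySem.List.pyRange 0 b 1).map (· + 1) := by
  have h := pyRange_shift 0 b
  norm_num at h
  exact h

theorem Aloop_eq_pairCount (ps : List (Int × Int × Int)) :
    Aloop ps = pairCount (ps.map fst2) := by
  induction ps with
  | nil => simp [Aloop, pairCount, PySem.List.pyRange_one_eq_nil]
  | cons v rest ih =>
    by_cases hr : rest = []
    · subst hr
      simp [Aloop, pairCount, PySem.List.pyRange_one_eq_nil]
    · have hlen : (0 : Int) < (rest.length : Int) := by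
        have : rest.length ≠ 0 := fun hh => hr (List.length_eq_zero_iff.mp hh)
        omega
      have hlen1 : ((v :: rest).length : Int) = (rest.length : Int) + 1 := by
        simp
      unfold Aloop
      rw [hlen1, show (rest.length : Int) + 1 - 1 = (rest.length : Int) by ring,
        PySem.List.pyRange_one_cons hlen]
      simp only [List.map_cons, List.sum_cons]
      rw [show (0 : Int) + 1 = 1 by ring]
      have hterm0 :
          ((PySem.List.pyRange 1 ((rest.length : Int) + 1) 1).map
            (fun j => indP (v :: rest) 0 j)).sum
          = ((rest.map fst2).countP (fun u => parB (fst2 v) u) : Int) := by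
        rw [pyRange_shift1 (rest.length : Int), List.map_map]
        have hcg : ∀ j ∈ PySem.List.pyRange 0 (rest.length : Int) 1,
            ((fun j => indP (v :: rest) 0 j) ∘ (· + 1)) j
              = (fun u => if parB (fst2 v) (fst2 u) then (1 : Int) else 0)
                  (PySem.List.pyGetD rest j (0, 0, 0)) := by
          intro j hj
          have hj0 : 0 ≤ j := (PySem.List.mem_pyRange_one.mp hj).1
          simp only [Function.comp_apply, indP]
          rw [pyGetD_cons_succ' v rest j hj0, PySem.List.pyGetD_zero_cons]
          rfl
        rw [List.map_congr_left hcg]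
        have hmm : List.map
              (fun a => (fun u => if parB (fst2 v) (fst2 u) then (1 : Int) else 0)
                (PySem.List.pyGetD rest a (0, 0, 0)))
              (PySem.List.pyRange 0 (rest.length : Int) 1)
            = List.map (fun u => if parB (fst2 v) (fst2 u) then (1 : Int) else 0)
                (List.map (fun a => PySem.List.pyGetD rest a ((0 : Int), (0 : Int), (0 : Int)))
                  (PySem.List.pyRange 0 (rest.length : Int) 1)) := by
          rw [List.map_map]
          simp [Function.comp_def]
        rw [hmm, ← PySem.List.len_eq,
          PySem.List.map_pyGetD_pyRange_zero rest ((0 : Int), (0 : Int), (0 : Int)),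
          PySem.List.sum_map_ite_one_zero]
        rw [List.countP_map]
        rfl
      have htail :
          ((PySem.List.pyRange 1 (rest.length : Int) 1).map (fun i =>
            ((PySem.List.pyRange (i + 1) ((rest.length : Int) + 1) 1).map
              (fun j => indP (v :: rest) i j)).sum)).sum
          = pairCount (rest.map fst2) := by
        rw [show PySem.List.pyRange 1 (rest.length : Int) 1
            = (PySem.List.pyRange 0 ((rest.length : Int) - 1) 1).map (· + 1) by
          rw [← pyRange_shift 0 ((rest.length : Int) - 1)]; norm_num,
          List.map_map]
        have hcg : ∀ i ∈ PySem.List.pyRange 0 ((rest.length : Int) - 1) 1,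
            ((fun i => ((PySem.List.pyRange (i + 1) ((rest.length : Int) + 1) 1).map
                (fun j => indP (v :: rest) i j)).sum) ∘ (· + 1)) i
              = ((PySem.List.pyRange (i + 1) (rest.length : Int) 1).map
                  (fun j => indP rest i j)).sum := by
          intro i hi
          have hi0 : 0 ≤ i := (PySem.List.mem_pyRange_one.mp hi).1
          simp only [Function.comp_apply]
          rw [pyRange_shift (i + 1) (rest.length : Int), List.map_map]
          congr 1
          apply List.map_congr_left
          intro j hj
          have hj0 : 0 ≤ j := by
            have := (PySem.List.mem_pyRange_one.mp hj).1
            omega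
          simp only [Function.comp_apply, indP]
          rw [pyGetD_cons_succ' v rest j hj0, pyGetD_cons_succ' v rest i hi0]
        rw [List.map_congr_left hcg, ← ih]
        rfl
      rw [hterm0, htail]
      simp [pairCount, fst2]

theorem points_eq (a b : List (Int × Int)) (h : a.length ≤ b.length) :
    (List.range a.length).map
        (fun k => points_to_abc (a.getD k (0, 0)) (b.getD k (0, 0)))
      = (a.zip b).map (fun p => points_to_abc p.1 p.2) := by
  induction a generalizing b with
  | nil => simp
  | cons x xs ih =>
    cases b with
    | nil => simp at h
    | cons y ys =>
      simp only [List.length_cons, List.range_succ_eq_map, List.map_cons, List.map_map,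
        List.zip_cons_cons]
      congr 1
      rw [← ih ys (by simpa using h)]
      apply List.map_congr_left
      intro k _
      simp

theorem solve_eq_pairCount (a b : List (Int × Int)) (h : a.length ≤ b.length) :
    solve a b = pairCount ((a.zip b).map dirOf) := by
  have hps :
      (PySem.List.pyRange 0 (PySem.List.len a) 1).foldl
        (fun pts i =>
          pts ++ [points_to_abc (PySem.List.pyGetD a i (0, 0)) (PySem.List.pyGetD b i (0, 0))]) []
      = (a.zip b).map (fun p => points_to_abc p.1 p.2) := by
    rw [PySem.List.foldl_append_singleton_eq_map, List.nil_append, PySem.List.len_eq,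
      PySem.List.pyRange_zero_natCast, List.map_map]
    rw [← points_eq a b h]
    apply List.map_congr_left
    intro k _
    simp
  show (PySem.List.pyRange 0 (PySem.List.len _ - 1) 1).foldl _ 0 = _
  rw [hps]
  set ps := (a.zip b).map (fun p => points_to_abc p.1 p.2) with hdef
  have hloop :
      (PySem.List.pyRange 0 (PySem.List.len ps - 1) 1).foldl
        (fun acc i =>
          (PySem.List.pyRange (i + 1) (PySem.List.len ps) 1).foldl
            (fun acc j =>
              acc + (if does_line_intersect (PySem.List.pyGetD ps i (0, 0, 0))
                          (PySem.List.pyGetD ps j (0, 0, 0)) then 1 else 0)) acc) 0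
      = Aloop ps := by
    show (PySem.List.pyRange 0 (PySem.List.len ps - 1) 1).foldl
        (fun acc i => (PySem.List.pyRange (i + 1) (PySem.List.len ps) 1).foldl
          (fun acc j => acc + indP ps i j) acc) 0 = Aloop ps
    rw [PySem.List.foldl_congr_mem _ _
      (fun acc i => acc + ((PySem.List.pyRange (i + 1) (PySem.List.len ps) 1).map
        (fun j => indP ps i j)).sum) 0
      (fun acc i _ => PySem.List.foldl_add _ _ acc),
      PySem.List.foldl_add]
    simp only [Aloop, PySem.List.len_eq, zero_add]
  rw [hloop, Aloop_eq_pairCount, hdef, List.map_map]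
  rfl

-- ===== B-side: the one-pass fold computes pairCount =====

theorem alt_invariant (l : List ((Int × Int) × (Int × Int))) :
    (l.foldl solveAltStep (0, 0, 0, PySem.Dict.empty)).1 = pairCount (l.map dirOf) ∧
    (l.foldl solveAltStep (0, 0, 0, PySem.Dict.empty)).2.1
      = ((l.map dirOf).countP (fun u => u == (0, 0)) : Int) ∧
    (l.foldl solveAltStep (0, 0, 0, PySem.Dict.empty)).2.2.1 = (l.length : Int) ∧
    ∀ k : Int × Int,
      (l.foldl solveAltStep (0, 0, 0, PySem.Dict.empty)).2.2.2.getD k 0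
        = ((l.map dirOf).countP (fun u => !(u == (0, 0)) && (normKey u.1 u.2 == k)) : Int) := by
  induction l using List.reverseRecOn with
  | nil =>
    exact ⟨rfl, by simp, rfl, fun k => by simp [PySem.Dict.getD_empty]⟩
  | append_singleton l x ih =>
    obtain ⟨ih1, ih2, ih3, ih4⟩ := ih
    simp only [List.foldl_append, List.foldl_cons, List.foldl_nil]
    set st := l.foldl solveAltStep (0, 0, 0, PySem.Dict.empty) with hst
    have hmap : (l ++ [x]).map dirOf = l.map dirOf ++ [dirOf x] := by simp
    by_cases hz : (x.2.2 - x.1.2 = 0 ∧ x.1.1 - x.2.1 = 0)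
    · have hdx : dirOf x = (0, 0) := by
        unfold dirOf; rw [hz.1, hz.2]
      simp only [solveAltStep, if_pos hz]
      refine ⟨?_, ?_, ?_, ?_⟩
      · rw [hmap, pairCount_append_singleton, ih1, ih3, hdx]
        have hall : (l.map dirOf).countP (fun u => parB u (0, 0)) = (l.map dirOf).length :=
          List.countP_eq_length.mpr (fun u _ => parB_zero_right u)
        rw [hall, List.length_map]
      · rw [hmap, List.countP_append, ih2, hdx]
        simp
      · simp [ih3]
      · intro k
        rw [ih4 k, hmap, List.countP_append, hdx]
        simp
    · have hvne : ¬((dirOf x).1 = 0 ∧ (dirOf x).2 = 0) := hz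
      simp only [solveAltStep, if_neg hz]
      have hxne : (dirOf x == ((0 : Int), (0 : Int))) = false := by
        rcases not_and_or.mp hz with h' | h' <;> simp [dirOf, Prod.ext_iff] <;> tauto
      refine ⟨?_, ?_, ?_, ?_⟩
      · rw [hmap, pairCount_append_singleton, ih1, ih2,
          ih4 (normKey (x.2.2 - x.1.2) (x.1.1 - x.2.1)),
          countP_par_split (dirOf x) hvne]
        simp only [dirOf]
        push_cast
        ring
      · rw [hmap, List.countP_append, ih2]
        simp [hxne]
      · simp [ih3]
      · intro k
        rw [PySem.Dict.getD_insert, hmap, List.countP_append]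
        by_cases hk : k = normKey (x.2.2 - x.1.2) (x.1.1 - x.2.1)
        · rw [if_pos hk, ih4 (normKey (x.2.2 - x.1.2) (x.1.1 - x.2.1)), ← hk]
          simp [List.countP_cons, dirOf, hk]
          tauto
        · rw [if_neg hk, ih4 k]
          have hne : (normKey (x.2.2 - x.1.2) (x.1.1 - x.2.1) == k) = false := by
            simp only [beq_eq_false_iff_ne, ne_eq]
            exact fun hh => hk hh.symm
          simp [dirOf, hne]

-- ===== VERDICT (by name: the statement is the Claim_ definition above) =====
theorem solve_spec : Claim_equal_solve := by
  intro a b _ hpre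
  unfold Spec_solve
  rw [solve_eq_pairCount a b hpre]
  exact ((alt_invariant (a.zip b)).1).symm
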